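-- pv_equiv track=rewrite | github.com/padieul/tactic-annot | mcp_server_example.py | analyze_common_errors
-- ===== SOURCE A (Python) =====
-- from typing import Any, Dict, List, Optional
--
-- def analyze_common_errors(failed_attempts: List[Dict]) -> List[str]:
--     """Analyze common error patterns."""
--     errors = [attempt.get("error", "") for attempt in failed_attempts]
--
--     common = []
--     if any("syntax" in e.lower() for e in errors):
--         common.append("syntax errors in aesop configuration")
--     if any("no progress" in e.lower() for e in errors):
--         common.append("aesop cannot make progress on goal")
--     if any("timeout" in e.lower() for e in errors):
--         common.append("proof validation timeout")
--
--     return common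
-- ===== SOURCE B (Python) =====
-- from typing import Any, Dict, List, Optional
--
-- def analyze_common_errors(failed_attempts: List[Dict]) -> List[str]:
--     """Analyze common error patterns (single pass with match flags)."""
--     found_syntax = found_noprogress = found_timeout = False
--     for attempt in failed_attempts:
--         e = attempt.get("error", "").lower()
--         found_syntax = found_syntax or "syntax" in e
--         found_noprogress = found_noprogress or "no progress" in e
--         found_timeout = found_timeout or "timeout" in e
--     common = []
--     if found_syntax:
--         common.append("syntax errors in aesop configuration")
--     if found_noprogress:
--         common.append("aesop cannot make progress on goal")
--     if found_timeout:
--         common.append("proof validation timeout")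
--     return common
-- ===== Notes on version B (the rewrite author's own statement) =====
-- stated objective: alternative
-- what changed: Replaces the three separate any() scans (each re-lowering every error string) with a single pass over failed_attempts that lower-cases each error once and maintains three boolean match flags, appending the fixed labels afterwards.
import Mathlib
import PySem

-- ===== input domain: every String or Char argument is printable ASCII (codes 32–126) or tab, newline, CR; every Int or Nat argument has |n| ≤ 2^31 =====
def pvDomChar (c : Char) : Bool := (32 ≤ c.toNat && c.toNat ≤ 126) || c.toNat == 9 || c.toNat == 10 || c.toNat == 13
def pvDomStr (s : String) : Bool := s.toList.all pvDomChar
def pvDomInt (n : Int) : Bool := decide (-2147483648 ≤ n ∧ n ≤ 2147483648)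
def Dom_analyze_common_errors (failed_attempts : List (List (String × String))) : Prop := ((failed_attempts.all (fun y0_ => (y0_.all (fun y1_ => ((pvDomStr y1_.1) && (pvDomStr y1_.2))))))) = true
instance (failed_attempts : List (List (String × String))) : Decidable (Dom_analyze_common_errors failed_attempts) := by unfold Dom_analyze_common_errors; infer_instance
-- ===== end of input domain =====

-- ===== PORT A =====
-- A: extract errors, then three separate any() scans, appending a label per matched category.
def analyze_common_errors (failed_attempts : List (List (String × String))) : List String :=
  let errors := failed_attempts.map (fun attempt => PySem.Dict.getD (PySem.Dict.mk attempt) "error" "")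
  let common : List String := []
  let common := if errors.any (fun e => PySem.Str.isIn "syntax" (PySem.Str.lower e)) then
      common ++ ["syntax errors in aesop configuration"] else common
  let common := if errors.any (fun e => PySem.Str.isIn "no progress" (PySem.Str.lower e)) then
      common ++ ["aesop cannot make progress on goal"] else common
  let common := if errors.any (fun e => PySem.Str.isIn "timeout" (PySem.Str.lower e)) then
      common ++ ["proof validation timeout"] else common
  common

-- ===== PORT B =====
-- B: one pass over failed_attempts maintaining three boolean flags, each error lower-cased once.
def analyze_common_errors_alt (failed_attempts : List (List (String × String))) : List String :=
  let flags := failed_attempts.foldl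
    (fun (st : Bool × Bool × Bool) attempt =>
      let e := PySem.Str.lower (PySem.Dict.getD (PySem.Dict.mk attempt) "error" "")
      (st.1 || PySem.Str.isIn "syntax" e,
       st.2.1 || PySem.Str.isIn "no progress" e,
       st.2.2 || PySem.Str.isIn "timeout" e))
    (false, false, false)
  let common : List String := []
  let common := if flags.1 then common ++ ["syntax errors in aesop configuration"] else common
  let common := if flags.2.1 then common ++ ["aesop cannot make progress on goal"] else common
  let common := if flags.2.2 then common ++ ["proof validation timeout"] else common
  common

-- ===== PRECONDITION & SPEC =====
def Spec_analyze_common_errors (failed_attempts : List (List (String × String))) (out : List String) : Prop := out = analyze_common_errors_alt failed_attempts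
instance (failed_attempts : List (List (String × String))) (out : List String) : Decidable (Spec_analyze_common_errors failed_attempts out) := by unfold Spec_analyze_common_errors; infer_instance

-- ===== CLAIM (what is proved, stated in full; the proofs are below) =====
def Claim_equal_analyze_common_errors : Prop := ∀ (failed_attempts : List (List (String × String))), Dom_analyze_common_errors failed_attempts → Spec_analyze_common_errors failed_attempts (analyze_common_errors failed_attempts)

-- ===== LEMMAS AND PROOFS =====

-- ===== VERDICT (by name: the statement is the Claim_ definition above) =====
-- The flag fold computes, componentwise, 'st_i || any p_i' over the attempts.
theorem pv_flags_fold (xs : List (List (String × String))) (st : Bool × Bool × Bool) :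
    xs.foldl
      (fun (st : Bool × Bool × Bool) attempt =>
        let e := PySem.Str.lower (PySem.Dict.getD (PySem.Dict.mk attempt) "error" "")
        (st.1 || PySem.Str.isIn "syntax" e,
         st.2.1 || PySem.Str.isIn "no progress" e,
         st.2.2 || PySem.Str.isIn "timeout" e)) st
    = (st.1 || xs.any (fun a => PySem.Str.isIn "syntax" (PySem.Str.lower (PySem.Dict.getD (PySem.Dict.mk a) "error" ""))),
       st.2.1 || xs.any (fun a => PySem.Str.isIn "no progress" (PySem.Str.lower (PySem.Dict.getD (PySem.Dict.mk a) "error" ""))),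
       st.2.2 || xs.any (fun a => PySem.Str.isIn "timeout" (PySem.Str.lower (PySem.Dict.getD (PySem.Dict.mk a) "error" "")))) := by
  induction xs generalizing st with
  | nil => simp
  | cons x xs ih =>
    simp only [List.foldl_cons, List.any_cons, ih]
    simp [Bool.or_assoc]

theorem analyze_common_errors_spec : Claim_equal_analyze_common_errors := by
  intro fa _
  unfold Spec_analyze_common_errors analyze_common_errors analyze_common_errors_alt
  rw [pv_flags_fold]
  simp [Function.comp_def]
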